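-- pv_equiv track=rewrite | github.com/mirko-laruina/AdventOfCode2022 | day6/sol.py | get_skippable_idx_rev
-- ===== SOURCE A (Python) =====
-- WINDOW_SIZE = 14
--
-- def get_skippable_idx_rev(window):
--     i = WINDOW_SIZE - 1
--     while i > 0:
--         for j, char_j in enumerate(window[i-1::-1]):
--             if window[i] == char_j:
--                 return i - j
--         i -= 1
--     return 0
-- ===== SOURCE B (Python) =====
-- WINDOW_SIZE = 14
--
-- def get_skippable_idx_rev(window):
--     last = {}
--     result = 0
--     for i in range(WINDOW_SIZE):
--         c = window[i]
--         if c in last: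
--             result = last[c] + 1
--         last[c] = i
--     return result
-- ===== Notes on version B (the rewrite author's own statement) =====
-- stated objective: simpler
-- what changed: Replaces A's backward outer loop with a repeated reversed-slice inner scan by a single forward pass over the 14 indices that maintains a dict of each character's most recent index and overwrites the result whenever a duplicate is seen.
-- outside the precondition, e.g. on get_skippable_idx_rev(''): A returns 0, B raises IndexError
import Mathlib
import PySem

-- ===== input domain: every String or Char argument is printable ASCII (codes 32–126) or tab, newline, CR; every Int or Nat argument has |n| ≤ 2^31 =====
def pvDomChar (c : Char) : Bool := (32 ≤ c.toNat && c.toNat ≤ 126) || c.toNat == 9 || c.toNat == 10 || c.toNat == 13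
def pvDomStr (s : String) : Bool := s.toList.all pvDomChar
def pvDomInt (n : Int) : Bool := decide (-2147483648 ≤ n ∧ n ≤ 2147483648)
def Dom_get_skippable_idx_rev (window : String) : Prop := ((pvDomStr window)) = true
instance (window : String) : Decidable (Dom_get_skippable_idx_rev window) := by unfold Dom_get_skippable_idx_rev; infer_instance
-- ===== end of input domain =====

-- B replaces A's backward scan-per-index search by one forward pass keeping a dict of last
-- occurrences (objective: simpler); proved equal on windows of length >= 14.


-- ===== PORT A =====
-- inner 'for j, char_j in enumerate(window[i-1::-1]): if window[i] == char_j: return i - j'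
def aInner (ci : Char) (rev : List Char) (i j : Int) : Option Int :=
  match rev with
  | [] => none
  | c :: rest => if ci = c then some (i - j) else aInner ci rest i (j + 1)

-- outer 'while i > 0: … i -= 1'; Python index i is the Nat argument (always ≥ 0).
-- window[i-1::-1] is the reversed prefix of length i: (l.take i).reverse (exact for every i ≥ 1,
-- Python clamps the start just as take does). window[i] is PySem.List.pyGet?; its IndexError
-- (reached only when the slice is nonempty, i.e. l ≠ []) is excluded by Pre_, so .getD 'A' is unreachable there.
def aLoop (l : List Char) : Nat → Int
  | 0 => 0
  | i + 1 =>
    let ci := (PySem.List.pyGet? l ((i : Int) + 1)).getD 'A'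
    match aInner ci ((l.take (i + 1)).reverse) ((i : Int) + 1) 0 with
    | some v => v
    | none => aLoop l i

def get_skippable_idx_rev (window : String) : Int :=
  aLoop window.toList 13          -- i = WINDOW_SIZE - 1

-- ===== PORT B =====
-- loop body of Source B: c = window[i]; if c in last: result = last[c] + 1; last[c] = i
def bStep (l : List Char) (st : PySem.Dict Char Int × Int) (i : Int) : PySem.Dict Char Int × Int :=
  let c := (PySem.List.pyGet? l i).getD 'A'   -- window[i]; default unreachable under Pre_
  let result := if st.1.contains c then st.1.getD c 0 + 1 else st.2
  (st.1.insert c i, result)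

def get_skippable_idx_rev_alt (window : String) : Int :=
  ((PySem.List.pyRange 0 14 1).foldl (bStep window.toList) (PySem.Dict.empty, 0)).2

-- ===== PRECONDITION & SPEC =====
-- Pre_ excludes windows shorter than 14: on lengths 1–13 A raises IndexError; on the empty
-- string A's index access is never reached so it returns an accidental 0, while B raises.
def Pre_get_skippable_idx_rev (window : String) : Prop := 14 ≤ window.toList.length
instance (window : String) : Decidable (Pre_get_skippable_idx_rev window) := by unfold Pre_get_skippable_idx_rev; infer_instance
def pvWitness_get_skippable_idx_rev : String := "abcdefghijklmn"

def Spec_get_skippable_idx_rev (window : String) (out : Int) : Prop := out = get_skippable_idx_rev_alt window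
instance (window : String) (out : Int) : Decidable (Spec_get_skippable_idx_rev window out) := by unfold Spec_get_skippable_idx_rev; infer_instance

-- ===== CLAIM (what is proved, stated in full; the proofs are below) =====
def Claim_equal_get_skippable_idx_rev : Prop := ∀ (window : String), Dom_get_skippable_idx_rev window → Pre_get_skippable_idx_rev window → Spec_get_skippable_idx_rev window (get_skippable_idx_rev window)

-- ===== LEMMAS AND PROOFS =====

-- index (from the left) of the LAST occurrence of ci in a list
def lastIdx? (ci : Char) : List Char → Option Nat
  | [] => none
  | x :: xs =>
    match lastIdx? ci xs with
    | some t => some (t + 1)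
    | none => if x = ci then some 0 else none

-- index of the FIRST occurrence of ci in a list
def firstIdx? (ci : Char) : List Char → Option Nat
  | [] => none
  | x :: xs => if ci = x then some 0 else (firstIdx? ci xs).map (· + 1)

theorem lastIdx?_snoc (ci x : Char) (xs : List Char) :
    lastIdx? ci (xs ++ [x]) = if x = ci then some xs.length else lastIdx? ci xs := by
  induction xs with
  | nil => simp [lastIdx?]
  | cons y ys ih =>
    simp only [List.cons_append, lastIdx?, ih]
    by_cases hx : x = ci <;> simp [hx]

theorem lastIdx?_lt (ci : Char) (xs : List Char) (k : Nat) (h : lastIdx? ci xs = some k) :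
    k < xs.length := by
  induction xs generalizing k with
  | nil => simp [lastIdx?] at h
  | cons y ys ih =>
    unfold lastIdx? at h
    rcases ht : lastIdx? ci ys with _ | t <;> rw [ht] at h
    · by_cases hy : y = ci
      · rw [if_pos hy] at h
        injection h with h
        simp [← h]
      · rw [if_neg hy] at h
        exact absurd h (by simp)
    · injection h with h
      have := ih t ht
      simp only [List.length_cons]
      omega

theorem firstIdx?_append (ci : Char) (ys zs : List Char) :
    firstIdx? ci (ys ++ zs) =
      match firstIdx? ci ys with
      | some t => some t
      | none => (firstIdx? ci zs).map (· + ys.length) := by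
  induction ys with
  | nil => simp [firstIdx?]
  | cons y ys ih =>
    by_cases h : ci = y
    · simp [firstIdx?, h]
    · simp only [List.cons_append, firstIdx?, if_neg h, ih]
      cases firstIdx? ci ys with
      | some t => simp
      | none =>
        cases firstIdx? ci zs with
        | some t => simp [List.length_cons]; omega
        | none => simp

theorem firstIdx?_reverse (ci : Char) (xs : List Char) :
    firstIdx? ci xs.reverse = (lastIdx? ci xs).map (fun k => xs.length - 1 - k) := by
  induction xs with
  | nil => simp [firstIdx?, lastIdx?]
  | cons x xs ih =>
    rw [List.reverse_cons, firstIdx?_append, ih]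
    rcases ht : lastIdx? ci xs with _ | t
    · simp only [Option.map_none]
      by_cases hx : x = ci
      · simp [lastIdx?, ht, hx, firstIdx?]
      · have : ¬ ci = x := fun h => hx h.symm
        simp [lastIdx?, ht, hx, firstIdx?, this]
    · have hk := lastIdx?_lt ci xs t ht
      simp only [Option.map_some]
      simp [lastIdx?, ht, List.length_cons]
      omega

theorem aInner_eq (ci : Char) (rs : List Char) (i j : Int) :
    aInner ci rs i j = (firstIdx? ci rs).map (fun t => i - (j + (t : Int))) := by
  induction rs generalizing j with
  | nil => simp [aInner, firstIdx?]
  | cons c rest ih =>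
    by_cases h : ci = c
    · simp [aInner, firstIdx?, h]
    · simp only [aInner, firstIdx?, if_neg h, ih]
      cases firstIdx? ci rest with
      | some t => simp; ring
      | none => rfl

theorem aInner_take (l : List Char) (ci : Char) (i : Nat) (hi : i ≤ l.length) :
    aInner ci ((l.take i).reverse) (i : Int) 0 =
      (lastIdx? ci (l.take i)).map (fun k => (k : Int) + 1) := by
  rw [aInner_eq, firstIdx?_reverse]
  rcases ht : lastIdx? ci (l.take i) with _ | k
  · simp
  · have hk := lastIdx?_lt ci (l.take i) k ht
    rw [List.length_take, Nat.min_eq_left hi] at hk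
    simp [List.length_take, Nat.min_eq_left hi]
    omega

-- main loop invariant: after the first n+1 iterations of B's forward loop, the result equals
-- A's backward search from index n, and the dict maps each char to its last index in take (n+1)
theorem main_inv (l : List Char) (n : Nat) (hn : n < l.length) :
    ((PySem.List.pyRange 0 ((n : Int) + 1) 1).foldl (bStep l) (PySem.Dict.empty, 0)).2 = aLoop l n ∧
    ∀ c : Char, ((PySem.List.pyRange 0 ((n : Int) + 1) 1).foldl (bStep l) (PySem.Dict.empty, 0)).1.get? c
        = (lastIdx? c (l.take (n + 1))).map (fun k => (k : Int)) := by
  induction n with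
  | zero =>
    have h01 : PySem.List.pyRange 0 (0 + 1) 1 = [(0 : Int)] := PySem.List.pyRange_one_singleton 0
    simp only [Nat.cast_zero, h01, List.foldl_cons, List.foldl_nil]
    have hget : PySem.List.pyGet? l (0 : Int) = some l[0] := by
      rw [show ((0:Int)) = ((0 : Nat) : Int) by norm_num, PySem.List.pyGet?_natCast]
      simp [List.getElem?_eq_getElem hn]
    constructor
    · simp [bStep, hget, aLoop]
    · intro c
      have htake : l.take 1 = [l[0]] := by
        rw [List.take_one]
        simp [List.head?_eq_getElem?, List.getElem?_eq_getElem hn]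
      simp only [bStep, hget, Option.getD_some, htake, lastIdx?]
      by_cases hc : c = l[0]
      · subst hc
        simp [PySem.Dict.get?_insert_self]
      · rw [PySem.Dict.get?_insert_of_ne _ _ hc]
        have : ¬ l[0] = c := fun h => hc h.symm
        simp [PySem.Dict.get?_empty, this]
  | succ n ih =>
    have hn' : n < l.length := by omega
    obtain ⟨ihr, ihd⟩ := ih hn'
    have hsplit : PySem.List.pyRange 0 ((↑(n+1) : Int) + 1) 1
        = PySem.List.pyRange 0 ((n : Int) + 1) 1 ++ [((n : Int) + 1)] := by
      push_cast
      exact PySem.List.pyRange_one_succ_right (by omega)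
    rw [hsplit, List.foldl_append, List.foldl_cons, List.foldl_nil]
    set st := (PySem.List.pyRange 0 ((n : Int) + 1) 1).foldl (bStep l) (PySem.Dict.empty, 0) with hst
    have hget : PySem.List.pyGet? l ((n : Int) + 1) = some l[n + 1] := by
      rw [show ((n : Int) + 1) = ((n + 1 : Nat) : Int) by push_cast; ring, PySem.List.pyGet?_natCast]
      simp [List.getElem?_eq_getElem hn]
    have htake : l.take (n + 2) = l.take (n + 1) ++ [l[n + 1]] := by
      rw [List.take_add_one]
      simp [List.getElem?_eq_getElem hn]
    have hA : aInner l[n+1] ((l.take (n+1)).reverse) ((n : Int) + 1) 0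
        = (lastIdx? l[n+1] (l.take (n+1))).map (fun k => (k : Int) + 1) := by
      have := aInner_take l (l[n+1]) (n+1) (by omega)
      push_cast at this ⊢
      exact this
    constructor
    · show (bStep l st ((n : Int) + 1)).2 = aLoop l (n + 1)
      simp only [bStep, hget, Option.getD_some]
      rw [PySem.Dict.contains_eq_isSome_get?, ihd]
      show _ = aLoop l (n + 1)
      rw [show aLoop l (n + 1) = match aInner ((PySem.List.pyGet? l ((n : Int) + 1)).getD 'A')
            ((l.take (n + 1)).reverse) ((n : Int) + 1) 0 with
          | some v => v | none => aLoop l n from rfl]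
      rw [hget]
      simp only [Option.getD_some, hA]
      rcases ht : lastIdx? l[n+1] (l.take (n+1)) with _ | k
      · simpa using ihr
      · have : st.1.getD l[n+1] 0 = (k : Int) := by
          rw [PySem.Dict.getD_eq_get?_getD, ihd, ht]; rfl
        simp [this]
    · intro c
      show (bStep l st ((n : Int) + 1)).1.get? c = _
      simp only [bStep, hget, Option.getD_some]
      rw [htake, lastIdx?_snoc]
      by_cases hc : c = l[n+1]
      · subst hc
        rw [PySem.Dict.get?_insert_self]
        simp [List.length_take, Nat.min_eq_left (by omega : n + 1 ≤ l.length)]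
      · rw [PySem.Dict.get?_insert_of_ne _ _ hc, ihd]
        have : ¬ l[n+1] = c := fun h => hc h.symm
        simp [this]

-- ===== VERDICT (by name: the statement is the Claim_ definition above) =====
theorem get_skippable_idx_rev_spec : Claim_equal_get_skippable_idx_rev := by
  intro window _ hpre
  show get_skippable_idx_rev window = get_skippable_idx_rev_alt window
  have h13 : (13 : Nat) < window.toList.length := by
    have := hpre; unfold Pre_get_skippable_idx_rev at this; omega
  have := (main_inv window.toList 13 h13).1
  unfold get_skippable_idx_rev get_skippable_idx_rev_alt
  rw [← this]
  norm_num
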